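-- pv_equiv track=rewrite | github.com/0gaowei/imgsegnew-main | img_seg/ImgSegAPI.py | get_round_corner_height
-- ===== SOURCE A (Python) =====
-- def get_round_corner_height(approx):
--     point_list = [point[0] for point in approx]
--     # 初始化最左、最上、最下和最右的点
--     leftmost_point = point_list[0]
--     topmost_point = point_list[0]
--     bottommost_point = point_list[0]
--     rightmost_point = point_list[0]
--     # 遍历坐标列表，找到最左、最上、最下和最右的点
--     for point in point_list:
--         x, y = point
--
--         # 更新最左的点
--         if x < leftmost_point[0]:
--             leftmost_point = point
--
--         # 更新最上的点
--         if y < topmost_point[1]: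
--             topmost_point = point
--
--         # 更新最下的点
--         if y > bottommost_point[1]:
--             bottommost_point = point
--
--         # 更新最右的点
--         if x > rightmost_point[0]:
--             rightmost_point = point
--     # 圆角高度取最左点y与最高最低点y的差值中的较小值
--     height = min(abs(leftmost_point[1] - topmost_point[1]), abs(leftmost_point[1] - bottommost_point[1]))
--     return int(height)
-- ===== SOURCE B (Python) =====
-- def get_round_corner_height(approx):
--     pts = [p[0] for p in approx]
--     by_x = sorted(pts, key=lambda q: q[0])
--     ly = by_x[0][1]
--     ys = sorted(q[1] for q in pts)
--     return int(min(abs(ly - ys[0]), abs(ly - ys[-1])))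
-- ===== Notes on version B (the rewrite author's own statement) =====
-- stated objective: alternative
-- what changed: Replaces A's single-pass four-accumulator scan by sort-then-pick: a stable sort by x whose first element is A's first-minimal leftmost point, and a sort of the y values whose two ends give the top and bottom extremes; the unused rightmost point is dropped.
import Mathlib
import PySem

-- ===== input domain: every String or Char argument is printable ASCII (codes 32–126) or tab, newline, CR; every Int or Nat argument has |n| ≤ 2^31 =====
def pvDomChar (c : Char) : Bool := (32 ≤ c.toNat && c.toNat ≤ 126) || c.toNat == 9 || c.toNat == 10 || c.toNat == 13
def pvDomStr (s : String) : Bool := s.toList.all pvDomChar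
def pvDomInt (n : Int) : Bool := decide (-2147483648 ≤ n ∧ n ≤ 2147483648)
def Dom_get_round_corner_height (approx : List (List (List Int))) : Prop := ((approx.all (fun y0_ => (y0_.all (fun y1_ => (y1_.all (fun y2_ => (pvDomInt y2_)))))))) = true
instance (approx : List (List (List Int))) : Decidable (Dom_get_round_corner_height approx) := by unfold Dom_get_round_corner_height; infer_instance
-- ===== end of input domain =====

-- ===== PORT A =====
-- B replaces A's four-accumulator scan by sort-then-pick (stable sort by x gives A's
-- first-minimal leftmost point; the ends of sorted y-values give top/bottom). Return values only.
def pvStep (st : List Int × List Int × List Int × List Int) (point : List Int) :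
    List Int × List Int × List Int × List Int :=
  let x := (PySem.List.pyGet? point 0).getD 0
  let y := (PySem.List.pyGet? point 1).getD 0
  let l := if x < (PySem.List.pyGet? st.1 0).getD 0 then point else st.1
  let t := if y < (PySem.List.pyGet? st.2.1 1).getD 0 then point else st.2.1
  let b := if y > (PySem.List.pyGet? st.2.2.1 1).getD 0 then point else st.2.2.1
  let r := if x > (PySem.List.pyGet? st.2.2.2 0).getD 0 then point else st.2.2.2
  (l, t, b, r)

def get_round_corner_height (approx : List (List (List Int))) : Int :=
  let point_list := approx.map (fun point => (PySem.List.pyGet? point 0).getD [])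
  match point_list with
  | [] => 0  -- Python raises IndexError here; excluded by Pre_
  | p0 :: _ =>
    let st := point_list.foldl pvStep (p0, p0, p0, p0)
    min ((PySem.List.pyGet? st.1 1).getD 0 - (PySem.List.pyGet? st.2.1 1).getD 0).natAbs
        ((PySem.List.pyGet? st.1 1).getD 0 - (PySem.List.pyGet? st.2.2.1 1).getD 0).natAbs

-- ===== PORT B =====
def get_round_corner_height_alt (approx : List (List (List Int))) : Int :=
  let pts := approx.map (fun p => (PySem.List.pyGet? p 0).getD [])
  let by_x := PySem.List.sorted pts (fun q => (PySem.List.pyGet? q 0).getD 0) false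
  let ly := (PySem.List.pyGet? ((PySem.List.pyGet? by_x 0).getD []) 1).getD 0
  let ys := PySem.List.sorted (pts.map (fun q => (PySem.List.pyGet? q 1).getD 0)) (fun y => y) false
  min (ly - (PySem.List.pyGet? ys 0).getD 0).natAbs
      (ly - (PySem.List.pyGet? ys (-1)).getD 0).natAbs

-- ===== PRECONDITION & SPEC =====
-- Pre_ admits exactly the inputs on which Python A returns: a nonempty approx whose every
-- element is nonempty (point[0] exists) and whose every point has exactly two coordinates
-- (the unpack `x, y = point` succeeds); elsewhere A raises IndexError or ValueError.
def Pre_get_round_corner_height (approx : List (List (List Int))) : Prop :=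
  approx ≠ [] ∧ ∀ p ∈ approx, p ≠ [] ∧ p.headI.length = 2
instance (approx : List (List (List Int))) : Decidable (Pre_get_round_corner_height approx) := by
  unfold Pre_get_round_corner_height; infer_instance

def pvWitness_get_round_corner_height : List (List (List Int)) := [[[0, 5]], [[2, 1]], [[3, 9]]]

def Spec_get_round_corner_height (approx : List (List (List Int))) (out : Int) : Prop := out = get_round_corner_height_alt approx
instance (approx : List (List (List Int))) (out : Int) : Decidable (Spec_get_round_corner_height approx out) := by unfold Spec_get_round_corner_height; infer_instance

-- ===== CLAIM (what is proved, stated in full; the proofs are below) =====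
def Claim_equal_get_round_corner_height : Prop := ∀ (approx : List (List (List Int))), Dom_get_round_corner_height approx → Pre_get_round_corner_height approx → Spec_get_round_corner_height approx (get_round_corner_height approx)

-- ===== LEMMAS AND PROOFS =====

-- the quadruple fold computes its four components independently
theorem pvFold_split (pts : List (List Int)) (l t b r : List Int) :
    pts.foldl pvStep (l, t, b, r) =
      (pts.foldl (fun m p => if (PySem.List.pyGet? p 0).getD 0 < (PySem.List.pyGet? m 0).getD 0 then p else m) l,
       pts.foldl (fun m p => if (PySem.List.pyGet? p 1).getD 0 < (PySem.List.pyGet? m 1).getD 0 then p else m) t,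
       pts.foldl (fun m p => if (PySem.List.pyGet? p 1).getD 0 > (PySem.List.pyGet? m 1).getD 0 then p else m) b,
       pts.foldl (fun m p => if (PySem.List.pyGet? p 0).getD 0 > (PySem.List.pyGet? m 0).getD 0 then p else m) r) := by
  induction pts generalizing l t b r with
  | nil => rfl
  | cons p ps ih => simp [List.foldl_cons, pvStep, ih]

-- the strict fold is idempotent on its initial element
theorem pvFold_self_lt {α κ : Type} [LinearOrder κ] (a : α) (xs : List α) (key : α → κ) :
    (a :: xs).foldl (fun m x => if key x < key m then x else m) a =
      xs.foldl (fun m x => if key x < key m then x else m) a := by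
  simp [List.foldl_cons]

theorem pvFold_self_gt {α κ : Type} [LinearOrder κ] (a : α) (xs : List α) (key : α → κ) :
    (a :: xs).foldl (fun m x => if key m < key x then x else m) a =
      xs.foldl (fun m x => if key m < key x then x else m) a := by
  simp [List.foldl_cons]

-- the key value of a first-minimum/maximum fold is the fold of min/max over the keys
theorem pvKey_foldl_min {α κ : Type} [LinearOrder κ] (a : α) (xs : List α) (key : α → κ) :
    key (xs.foldl (fun m x => if key x < key m then x else m) a) =
      (xs.map key).foldl min (key a) := by
  induction xs generalizing a with
  | nil => rfl
  | cons x xs ih =>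
    simp only [List.foldl_cons, List.map_cons]
    by_cases h : key x < key a
    · simp [h, ih, min_eq_right (le_of_lt h)]
    · simp [h, ih, min_eq_left (le_of_not_gt h)]

theorem pvKey_foldl_max {α κ : Type} [LinearOrder κ] (a : α) (xs : List α) (key : α → κ) :
    key (xs.foldl (fun m x => if key m < key x then x else m) a) =
      (xs.map key).foldl max (key a) := by
  induction xs generalizing a with
  | nil => rfl
  | cons x xs ih =>
    simp only [List.foldl_cons, List.map_cons]
    by_cases h : key a < key x
    · simp [h, ih, max_eq_right (le_of_lt h)]
    · simp [h, ih, max_eq_left (le_of_not_gt h)]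

-- insertBy never empties a list
theorem pvInsertBy_ne_nil {α : Type} (before : α → α → Bool) (x : α) (l : List α) :
    PySem.List.insertBy before x l ≠ [] := by
  cases l with
  | nil => simp [PySem.List.insertBy]
  | cons y ys => simp only [PySem.List.insertBy]; split <;> simp

-- head of an insertion is decided by comparison with the old head
theorem pvHead_insertBy {α : Type} [Inhabited α] (before : α → α → Bool) (x : α) (l : List α)
    (hl : l ≠ []) :
    (PySem.List.insertBy before x l).headI = if before x l.headI then x else l.headI := by
  cases l with
  | nil => exact absurd rfl hl
  | cons y ys =>
    by_cases h : before x y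
    · simp [PySem.List.insertBy, h]
    · simp [PySem.List.insertBy, h]

-- the head of an insertion-sort fold is the strict first-minimum fold
theorem pvHead_foldl_insertBy {α : Type} [Inhabited α] (before : α → α → Bool)
    (xs : List α) (l : List α) (hl : l ≠ []) :
    (xs.foldl (fun acc x => PySem.List.insertBy before x acc) l).headI =
      xs.foldl (fun m x => if before x m then x else m) l.headI := by
  induction xs generalizing l with
  | nil => rfl
  | cons x xs ih =>
    simp only [List.foldl_cons]
    rw [ih _ (pvInsertBy_ne_nil before x l), pvHead_insertBy before x l hl]

-- head of a stable sort of a nonempty list = A's strict first-minimum fold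
theorem pvHead_sorted {α κ : Type} [Inhabited α] [LinearOrder κ] (a : α) (xs : List α)
    (key : α → κ) :
    (PySem.List.sorted (a :: xs) key false).headI =
      xs.foldl (fun m x => if key x < key m then x else m) a := by
  rw [PySem.List.sorted_eq_foldl_insertBy]
  simp only [List.foldl_cons]
  rw [pvHead_foldl_insertBy _ xs (PySem.List.insertBy _ a []) (pvInsertBy_ne_nil _ a [])]
  have h1 : (PySem.List.insertBy (fun a b => decide (key a < key b)) a []).headI = a := by
    simp [PySem.List.insertBy]
  rw [h1]
  have h2 : (fun (m x : α) => if (decide (key x < key m)) = true then x else m)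
          = (fun (m x : α) => if key x < key m then x else m) := by
    funext m x; simp
  rw [h2]

-- the strict first-minimum fold over values is the fold of min
theorem pvFold_lt_eq_min (a : Int) (xs : List Int) :
    xs.foldl (fun m x => if x < m then x else m) a = xs.foldl min a := by
  have h : (fun (m x : Int) => if x < m then x else m) = (fun (m x : Int) => min m x) := by
    funext m x; rw [min_def]; split_ifs <;> omega
  rw [h]

-- the fold of max is an element of the list it folds over
theorem pvFoldl_max_mem (a : Int) (xs : List Int) : xs.foldl max a ∈ a :: xs := by
  induction xs generalizing a with
  | nil => simp
  | cons x xs ih =>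
    simp only [List.foldl_cons]
    simp only [List.mem_cons] at *
    rcases ih (max a x) with h | h
    · rcases max_choice a x with hm | hm
      · exact Or.inl (h.trans hm)
      · exact Or.inr (Or.inl (h.trans hm))
    · exact Or.inr (Or.inr h)

-- in a nondecreasing nonempty list every element is at most the last one
theorem pvPairwise_le_getLast (l : List Int) (hl : l ≠ []) (hp : l.Pairwise (· ≤ ·))
    (x : Int) (hx : x ∈ l) : x ≤ l.getLast hl := by
  rw [List.pairwise_iff_getElem] at hp
  obtain ⟨i, hi, rfl⟩ := List.mem_iff_getElem.mp hx
  rw [List.getLast_eq_getElem]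
  rcases Nat.lt_or_ge i (l.length - 1) with h | h
  · exact hp i (l.length - 1) hi (by omega) h
  · have : i = l.length - 1 := by omega
    subst this; exact le_refl _

-- Python l[0] and l[-1] on a nonempty list
theorem pvGet_zero {α : Type} [Inhabited α] (l : List α) (hl : l ≠ []) :
    PySem.List.pyGet? l 0 = some l.headI := by
  cases l with
  | nil => exact absurd rfl hl
  | cons x xs => simp [PySem.List.pyGet?, PySem.List.pyIdx?]

theorem pvGet_neg_one {α : Type} [Inhabited α] (l : List α) (hl : l ≠ []) :
    PySem.List.pyGet? l (-1) = some (l.getLast hl) := by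
  have hn : 0 < l.length := List.length_pos_iff.mpr hl
  simp only [PySem.List.pyGet?, PySem.List.pyIdx?]
  have h0 : ¬ (0 : Int) ≤ -1 := by omega
  have h1 : -(l.length : Int) ≤ -1 := by omega
  simp only [h0, if_false, h1, if_true, Option.bind_some]
  have h2 : ((-(-1 : Int)).toNat) = 1 := rfl
  rw [h2, List.getLast_eq_getElem, List.getElem?_eq_getElem (by omega)]

-- the last element of sorted values is the fold of max over them
theorem pvLast_sorted_max (a : Int) (xs : List Int)
    (h : PySem.List.sorted (a :: xs) (fun y => y) false ≠ []) :
    (PySem.List.sorted (a :: xs) (fun y => y) false).getLast h = xs.foldl max a := by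
  have hmemL : ∀ y, y ∈ PySem.List.sorted (a :: xs) (fun y => y) false ↔ y ∈ a :: xs :=
    fun y => PySem.List.mem_sorted (a :: xs) _ _ y
  have hlast_mem : (PySem.List.sorted (a :: xs) (fun y => y) false).getLast h ∈ a :: xs :=
    (hmemL _).mp (List.getLast_mem h)
  have hM_mem : xs.foldl max a ∈ PySem.List.sorted (a :: xs) (fun y => y) false :=
    (hmemL _).mpr (pvFoldl_max_mem a xs)
  have hub := PySem.List.le_foldl_max xs a
  have h1 : (PySem.List.sorted (a :: xs) (fun y => y) false).getLast h ≤ xs.foldl max a := by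
    rcases List.mem_cons.mp hlast_mem with hh | hh
    · rw [hh]; exact hub.1
    · exact hub.2 _ hh
  have h2 : xs.foldl max a ≤ (PySem.List.sorted (a :: xs) (fun y => y) false).getLast h :=
    pvPairwise_le_getLast _ h (PySem.List.sorted_pairwise (a :: xs) (fun y => y)) _ hM_mem
  exact le_antisymm h1 h2

-- ===== VERDICT (by name: the statement is the Claim_ definition above) =====
theorem get_round_corner_height_spec : Claim_equal_get_round_corner_height := by
  intro approx _ hpre
  unfold Spec_get_round_corner_height get_round_corner_height get_round_corner_height_alt
  cases happ : approx.map (fun p => (PySem.List.pyGet? p 0).getD []) with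
  | nil => exact absurd (List.map_eq_nil_iff.mp happ) hpre.1
  | cons p0 rest =>
    simp only [List.map_cons]
    rw [pvFold_split]
    have hgt : (fun (m p : List Int) => if (PySem.List.pyGet? p 1).getD 0 > (PySem.List.pyGet? m 1).getD 0 then p else m)
             = (fun (m p : List Int) => if (PySem.List.pyGet? m 1).getD 0 < (PySem.List.pyGet? p 1).getD 0 then p else m) := by
      funext m p; rfl
    rw [hgt, pvFold_self_lt p0 rest (fun q => (PySem.List.pyGet? q 0).getD 0),
        pvFold_self_lt p0 rest (fun q => (PySem.List.pyGet? q 1).getD 0),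
        pvFold_self_gt p0 rest (fun q => (PySem.List.pyGet? q 1).getD 0)]
    have hne1 : PySem.List.sorted (p0 :: rest) (fun q => (PySem.List.pyGet? q 0).getD 0) false ≠ [] := by
      rw [Ne, PySem.List.sorted_eq_nil_iff]; simp
    have hne2 : PySem.List.sorted (((PySem.List.pyGet? p0 1).getD 0) :: rest.map (fun q => (PySem.List.pyGet? q 1).getD 0)) (fun y => y) false ≠ [] := by
      rw [Ne, PySem.List.sorted_eq_nil_iff]; simp
    rw [pvGet_zero _ hne1, Option.getD_some, pvHead_sorted,
        pvGet_zero _ hne2, Option.getD_some, pvHead_sorted, pvFold_lt_eq_min,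
        ← pvKey_foldl_min p0 rest (fun q => (PySem.List.pyGet? q 1).getD 0),
        pvGet_neg_one _ hne2, Option.getD_some, pvLast_sorted_max,
        ← pvKey_foldl_max p0 rest (fun q => (PySem.List.pyGet? q 1).getD 0)]
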